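-- pv_equiv track=rewrite | github.com/ganeshraj-k/amazon_practice_questions | findmaxpackages.py | findMaximumPackages
-- ===== SOURCE A (Python) =====
-- from typing import List
--
-- def findMaximumPackages(cost: List[int]) -> int:
--     cost.sort()
--     if len(cost) <= 2:
--         return 1
--
--     minsum = cost[0] + cost[1]
--     maxsum = cost[len(cost) - 1] + cost[len(cost) - 2]
--
--     begin = 0
--     end = len(cost) - 1
--
--     counts = [1]
--
--     for target in range(minsum, maxsum + 1):
--         count = 0
--         begin = 0
--         end = len(cost) - 1
--         while begin < end:
--             sum1 = cost[begin] + cost[end]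
--
--             if cost[begin] > target:
--                 break
--             elif cost[begin] == target:
--                 count += 1
--                 begin += 1
--             elif cost[end] == target:
--                 count += 1
--                 end -= 1
--             elif sum1 == target:
--                 count += 1
--                 begin += 1
--                 end -= 1
--             elif sum1 < target:
--                 begin += 1
--             else:
--                 end -= 1
--         counts.append(count)
--
--     return max(counts)
-- ===== SOURCE B (Python) =====
-- from typing import List
--
-- def _count_at(cost: List[int], target: int) -> int:
--     # the same two-pointer match count A computes per target
--     count = 0
--     begin = 0
--     end = len(cost) - 1
--     while begin < end:
--         sum1 = cost[begin] + cost[end]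
--         if cost[begin] > target:
--             break
--         elif cost[begin] == target:
--             count += 1
--             begin += 1
--         elif cost[end] == target:
--             count += 1
--             end -= 1
--         elif sum1 == target:
--             count += 1
--             begin += 1
--             end -= 1
--         elif sum1 < target:
--             begin += 1
--         else:
--             end -= 1
--     return count
--
-- def findMaximumPackages(cost: List[int]) -> int:
--     # Like A, sorts `cost` in place.  Instead of scanning every integer target
--     # in [minsum, maxsum], evaluates the count only at the candidate targets
--     # (element values and pair sums inside that range) -- the count is 0
--     # everywhere else.
--     cost.sort()
--     n = len(cost)
--     if n <= 2:
--         return 1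
--     minsum = cost[0] + cost[1]
--     maxsum = cost[n - 1] + cost[n - 2]
--     vals = [v for v in cost if minsum <= v <= maxsum]
--     sums = [cost[i] + cost[j] for i in range(n) for j in range(i + 1, n)
--             if minsum <= cost[i] + cost[j] <= maxsum]
--     best = 1
--     for t in set(vals + sums):
--         c = _count_at(cost, t)
--         if c > best:
--             best = c
--     return best
-- ===== Notes on version B (the rewrite author's own statement) =====
-- stated objective: alternative
-- what changed: Instead of running the two-pointer count for every integer target in [minsum, maxsum], B runs the identical two-pointer count only at the candidate targets (element values and pair sums that lie in that range), which are the only targets with a nonzero count.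
import Mathlib
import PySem

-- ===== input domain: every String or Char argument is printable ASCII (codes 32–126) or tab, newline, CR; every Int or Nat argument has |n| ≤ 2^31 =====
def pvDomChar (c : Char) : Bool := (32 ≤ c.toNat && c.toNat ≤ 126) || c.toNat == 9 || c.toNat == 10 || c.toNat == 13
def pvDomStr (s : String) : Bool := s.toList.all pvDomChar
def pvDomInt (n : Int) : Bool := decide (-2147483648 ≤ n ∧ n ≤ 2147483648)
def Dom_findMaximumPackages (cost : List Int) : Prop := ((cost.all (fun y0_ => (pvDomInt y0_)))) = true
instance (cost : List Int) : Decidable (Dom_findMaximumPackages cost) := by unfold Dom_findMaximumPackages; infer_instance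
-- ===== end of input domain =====

-- B evaluates the same two-pointer count only at the candidate targets (in-range
-- element values and pair sums), the only targets where it is nonzero, instead of at
-- every integer in [minsum, maxsum]. Both Pythons sort `cost` in place; the
-- equivalence proved here is about the return value (B performs the same mutation).

-- ===== PORT A =====
-- A's inner `while begin < end` loop; all indices are nonnegative and < c.length, so
-- Python's cost[i] is exactly List.getD i 0.
def twoPtrCount (c : List Int) (target : Int) (b e : Nat) (count : Int) : Int :=
  if h : b < e then
    let cb := c.getD b 0
    let ce := c.getD e 0
    let sum1 := cb + ce
    if cb > target then count
    else if cb = target then twoPtrCount c target (b + 1) e (count + 1)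
    else if ce = target then twoPtrCount c target b (e - 1) (count + 1)
    else if sum1 = target then twoPtrCount c target (b + 1) (e - 1) (count + 1)
    else if sum1 < target then twoPtrCount c target (b + 1) e count
    else twoPtrCount c target b (e - 1) count
  else count
termination_by e - b
decreasing_by all_goals omega

def findMaximumPackages (cost : List Int) : Int :=
  let c := PySem.List.sorted cost (fun y => y) false
  if c.length ≤ 2 then 1
  else
    let minsum := c.getD 0 0 + c.getD 1 0
    let maxsum := c.getD (c.length - 1) 0 + c.getD (c.length - 2) 0
    let counts := (PySem.List.pyRange minsum (maxsum + 1) 1).foldl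
        (fun acc t => acc ++ [twoPtrCount c t 0 (c.length - 1) 0]) [1]
    -- max(counts); counts is nonempty (it starts as [1]), so max? is some
    (PySem.List.max? counts (fun y => y)).getD 0

-- ===== PORT B =====
-- Source B's helper _count_at is the identical two-pointer loop: it is twoPtrCount above.
-- range(i+1, n) over nonnegative indices is List.range' (i+1) (n-(i+1)).
def findMaximumPackages_alt (cost : List Int) : Int :=
  let c := PySem.List.sorted cost (fun y => y) false
  let n := c.length
  if n ≤ 2 then 1
  else
    let minsum := c.getD 0 0 + c.getD 1 0
    let maxsum := c.getD (n - 1) 0 + c.getD (n - 2) 0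
    let vals := c.filter (fun v => decide (minsum ≤ v ∧ v ≤ maxsum))
    let sums := (List.range n).flatMap (fun i =>
      ((List.range' (i + 1) (n - (i + 1))).filter
          (fun j => decide (minsum ≤ c.getD i 0 + c.getD j 0 ∧ c.getD i 0 + c.getD j 0 ≤ maxsum))).map
        (fun j => c.getD i 0 + c.getD j 0))
    -- `for t in set(vals + sums)`: a running max, whose value does not depend on the
    -- set's iteration order; ported in the Set's (first-insertion) list order.
    (PySem.Set.ofList (vals ++ sums)).foldl
      (fun best t =>
        let cnt := twoPtrCount c t 0 (n - 1) 0
        if cnt > best then cnt else best) 1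

-- ===== PRECONDITION & SPEC =====
def Spec_findMaximumPackages (cost : List Int) (out : Int) : Prop := out = findMaximumPackages_alt cost
instance (cost : List Int) (out : Int) : Decidable (Spec_findMaximumPackages cost out) := by unfold Spec_findMaximumPackages; infer_instance

-- ===== CLAIM (what is proved, stated in full; the proofs are below) =====
def Claim_equal_findMaximumPackages : Prop := ∀ (cost : List Int), Dom_findMaximumPackages cost → Spec_findMaximumPackages cost (findMaximumPackages cost)

-- ===== LEMMAS AND PROOFS =====

-- If target is neither an element of c nor a pair sum c[i]+c[j] (i<j), no branch of the
-- two-pointer loop ever increments the count.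
theorem twoPtrCount_eq_of_no_match (c : List Int) (t : Int)
    (hel : ∀ v ∈ c, v ≠ t)
    (hsum : ∀ i j : Nat, i < j → j < c.length → c.getD i 0 + c.getD j 0 ≠ t) :
    ∀ b e cnt, e < c.length → twoPtrCount c t b e cnt = cnt := by
  have main : ∀ d b e (cnt : Int), e - b ≤ d → e < c.length → twoPtrCount c t b e cnt = cnt := by
    intro d
    induction d with
    | zero =>
      intro b e cnt hd he
      rw [twoPtrCount]
      have hbe : ¬ b < e := by omega
      simp [hbe]
    | succ d ih =>
      intro b e cnt hd he
      rw [twoPtrCount]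
      by_cases hbe : b < e
      · have hbc : c.getD b 0 ≠ t := by
          rw [List.getD_eq_getElem c 0 (by omega)]
          exact hel _ (List.getElem_mem _)
        have hec : c.getD e 0 ≠ t := by
          rw [List.getD_eq_getElem c 0 he]
          exact hel _ (List.getElem_mem _)
        have hsc : c.getD b 0 + c.getD e 0 ≠ t := hsum b e hbe he
        simp only [hbe, dite_true, gt_iff_lt]
        -- split_ifs discharges the three equality branches against hbc/hec/hsc
        split_ifs with h1 h2
        · rfl
        · exact ih (b + 1) e cnt (by omega) he
        · exact ih b (e - 1) cnt (by omega) (by omega)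
      · simp [hbe]
  intro b e cnt he
  exact main (e - b) b e cnt le_rfl he

theorem foldl_max_le (f : Int → Int) (l : List Int) (init r : Int)
    (h0 : init ≤ r) (h : ∀ x ∈ l, f x ≤ r) :
    l.foldl (fun a x => max a (f x)) init ≤ r := by
  induction l generalizing init with
  | nil => simpa using h0
  | cons x xs ih =>
    simp only [List.foldl_cons]
    exact ih _ (max_le h0 (h x (List.mem_cons_self ..)))
      (fun y hy => h y (List.mem_cons_of_mem _ hy))

-- two running maxes starting at 1 agree when f vanishes on R \ S and S ⊆ R
theorem maxfold_eq (f : Int → Int) (R S : List Int)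
    (h1 : ∀ t ∈ R, t ∉ S → f t = 0) (h2 : ∀ t ∈ S, t ∈ R) :
    R.foldl (fun a t => max a (f t)) 1 = S.foldl (fun a t => max a (f t)) 1 := by
  have hS := PySem.List.le_foldl_max_int S f 1
  have hR := PySem.List.le_foldl_max_int R f 1
  apply le_antisymm
  · refine foldl_max_le f R 1 _ hS.1 (fun t ht => ?_)
    by_cases hts : t ∈ S
    · exact hS.2 t hts
    · rw [h1 t ht hts]; omega
  · exact foldl_max_le f S 1 _ hR.1 (fun t ht => hR.2 t (h2 t ht))

-- the post-sort computation of A equals that of B, for ANY list c and any bounds ms, mx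
theorem core (c : List Int) (ms mx : Int) (hn : 0 < c.length) :
    (PySem.List.max? ((PySem.List.pyRange ms (mx + 1) 1).foldl
        (fun acc t => acc ++ [twoPtrCount c t 0 (c.length - 1) 0]) [1]) (fun y => y)).getD 0
    = (PySem.Set.ofList
        ((c.filter (fun v => decide (ms ≤ v ∧ v ≤ mx))) ++
         ((List.range c.length).flatMap (fun i =>
            ((List.range' (i + 1) (c.length - (i + 1))).filter
                (fun j => decide (ms ≤ c.getD i 0 + c.getD j 0 ∧ c.getD i 0 + c.getD j 0 ≤ mx))).map
              (fun j => c.getD i 0 + c.getD j 0))))).foldl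
        (fun best t =>
          if twoPtrCount c t 0 (c.length - 1) 0 > best then twoPtrCount c t 0 (c.length - 1) 0
          else best) 1 := by
  rw [PySem.List.foldl_append_singleton_eq_map, List.singleton_append,
    PySem.List.max?_id_cons, Option.getD_some, List.foldl_map]
  have hbody : (fun (best t : Int) =>
        if twoPtrCount c t 0 (c.length - 1) 0 > best then twoPtrCount c t 0 (c.length - 1) 0
        else best)
      = fun best t => max best (twoPtrCount c t 0 (c.length - 1) 0) := by
    funext best t
    simp only [max_def, gt_iff_lt]
    split_ifs <;> omega
  rw [hbody]
  have hmemS : ∀ t, t ∈ (PySem.Set.ofList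
        ((c.filter (fun v => decide (ms ≤ v ∧ v ≤ mx))) ++
         ((List.range c.length).flatMap (fun i =>
            ((List.range' (i + 1) (c.length - (i + 1))).filter
                (fun j => decide (ms ≤ c.getD i 0 + c.getD j 0 ∧ c.getD i 0 + c.getD j 0 ≤ mx))).map
              (fun j => c.getD i 0 + c.getD j 0))))) ↔
      ((t ∈ c ∧ ms ≤ t ∧ t ≤ mx) ∨
       ∃ i j : Nat, i < j ∧ j < c.length ∧ c.getD i 0 + c.getD j 0 = t ∧ ms ≤ t ∧ t ≤ mx) := by
    intro t
    rw [PySem.Set.mem_ofList, List.mem_append]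
    constructor
    · rintro (hv | hs)
      · simp only [List.mem_filter, decide_eq_true_eq] at hv
        exact Or.inl ⟨hv.1, hv.2⟩
      · simp only [List.mem_flatMap, List.mem_map, List.mem_filter, List.mem_range,
          List.mem_range'_1, decide_eq_true_eq] at hs
        obtain ⟨i, hi, j, ⟨⟨hj1, hj2⟩, hb⟩, heq⟩ := hs
        exact Or.inr ⟨i, j, by omega, by omega, heq, by rw [← heq]; exact hb.1, by rw [← heq]; exact hb.2⟩
    · rintro (⟨hv, hb1, hb2⟩ | ⟨i, j, hij, hjn, heq, hb1, hb2⟩)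
      · exact Or.inl (by simp only [List.mem_filter, decide_eq_true_eq]; exact ⟨hv, hb1, hb2⟩)
      · refine Or.inr ?_
        simp only [List.mem_flatMap, List.mem_map, List.mem_filter, List.mem_range,
          List.mem_range'_1, decide_eq_true_eq]
        exact ⟨i, by omega, j, ⟨⟨by omega, by omega⟩, by rw [heq]; exact ⟨hb1, hb2⟩⟩, heq⟩
  apply maxfold_eq
  · intro t htR htS
    rw [PySem.List.mem_pyRange_one] at htR
    rw [hmemS] at htS
    push Not at htS
    apply twoPtrCount_eq_of_no_match c t
    · intro v hv hvt
      have := htS.1 (by rwa [hvt] at hv) (by omega)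
      omega
    · intro i j hij hjn hsum
      have := htS.2 i j hij hjn hsum (by omega)
      omega
    · omega
  · intro t htS
    rw [hmemS] at htS
    rw [PySem.List.mem_pyRange_one]
    rcases htS with ⟨_, hb1, hb2⟩ | ⟨_, _, _, _, _, hb1, hb2⟩ <;> exact ⟨hb1, by omega⟩

theorem AB (cost : List Int) : findMaximumPackages cost = findMaximumPackages_alt cost := by
  unfold findMaximumPackages findMaximumPackages_alt
  by_cases h2 : (PySem.List.sorted cost (fun y => y) false).length ≤ 2
  · simp only [h2, if_true]
  · simp only [h2, if_false]
    exact core _ _ _ (by omega)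

-- ===== VERDICT (by name: the statement is the Claim_ definition above) =====
theorem findMaximumPackages_spec : Claim_equal_findMaximumPackages := by
  intro cost _
  unfold Spec_findMaximumPackages
  exact AB cost
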